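-- pv_equiv track=rewrite | github.com/917-SzaboBalazs/ElGamal | src/el_gamal.py | _message_to_int
-- ===== SOURCE A (Python) =====
-- def _message_to_int(msg: str) -> int:
--     """
--     Convert a string message to an integer code.
--
--     @param msg: The input string message to be converted.
--     @return: The integer code generated from the input message.
--     """
--     code = 0
--     power = len(msg) - 1
--
--     for ch in msg:
--         if ch != ' ':
--             code += (ord(ch) - ord('a') + 1) * pow(27, power)
--
--         power -= 1
--
--     return code
-- ===== SOURCE B (Python) =====
-- def _message_to_int(msg: str) -> int:
--     # Horner's method: one O(1)-size multiply per character instead of pow(27, power).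
--     code = 0
--     for ch in msg:
--         code = code * 27 + (0 if ch == ' ' else ord(ch) - ord('a') + 1)
--     return code
-- ===== Notes on version B (the rewrite author's own statement) =====
-- stated objective: faster
-- what changed: Replaces the per-character pow(27, power) positional sum with Horner's method (code = code*27 + digit), eliminating repeated big-integer exponentiations.
import Mathlib
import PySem

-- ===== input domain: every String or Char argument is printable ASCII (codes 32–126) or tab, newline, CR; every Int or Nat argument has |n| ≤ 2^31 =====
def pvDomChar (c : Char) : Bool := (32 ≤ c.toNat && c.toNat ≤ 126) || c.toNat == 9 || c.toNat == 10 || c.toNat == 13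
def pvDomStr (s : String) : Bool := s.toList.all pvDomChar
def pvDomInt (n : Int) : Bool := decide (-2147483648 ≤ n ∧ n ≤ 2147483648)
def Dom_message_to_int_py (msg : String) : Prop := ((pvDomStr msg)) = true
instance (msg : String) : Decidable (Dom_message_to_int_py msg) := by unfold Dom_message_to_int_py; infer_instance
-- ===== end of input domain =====

-- ===== PORT A =====
-- Literal port of A: accumulate (ord ch - ord 'a' + 1) * 27^power, power counting down.
def message_to_int_py (msg : String) : Int :=
  (msg.toList.foldl
    (fun (s : Int × Int) ch =>
      ((if ch ≠ ' ' then s.1 + ((ch.toNat : Int) - 97 + 1) * 27 ^ s.2.toNat else s.1),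
       s.2 - 1))
    (0, (msg.toList.length : Int) - 1)).1

-- ===== PORT B =====
-- B (Horner): code = code*27 + digit, one pass, no pow.
def message_to_int_py_alt (msg : String) : Int :=
  msg.toList.foldl
    (fun (code : Int) ch => code * 27 + (if ch = ' ' then 0 else (ch.toNat : Int) - 96))
    0

-- ===== PRECONDITION & SPEC =====
def Spec_message_to_int_py (msg : String) (out : Int) : Prop := out = message_to_int_py_alt msg
instance (msg : String) (out : Int) : Decidable (Spec_message_to_int_py msg out) := by unfold Spec_message_to_int_py; infer_instance

-- ===== CLAIM (what is proved, stated in full; the proofs are below) =====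
def Claim_equal_message_to_int_py : Prop := ∀ (msg : String), Dom_message_to_int_py msg → Spec_message_to_int_py msg (message_to_int_py msg)

-- ===== LEMMAS AND PROOFS =====

def pvDigit (ch : Char) : Int := if ch = ' ' then 0 else (ch.toNat : Int) - 96

def pvVal : List Char → Int
  | [] => 0
  | ch :: t => pvDigit ch * 27 ^ t.length + pvVal t

lemma pvA_fold (l : List Char) (c : Int) :
    (l.foldl
      (fun (s : Int × Int) ch =>
        ((if ch ≠ ' ' then s.1 + ((ch.toNat : Int) - 97 + 1) * 27 ^ s.2.toNat else s.1),
         s.2 - 1))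
      (c, (l.length : Int) - 1)).1 = c + pvVal l := by
  induction l generalizing c with
  | nil => simp [pvVal]
  | cons ch t ih =>
    simp only [List.foldl_cons, List.length_cons]
    have h1 : ((t.length : Int) + 1 - 1) = (t.length : Int) := by ring
    have h2 : ((t.length : Int)).toNat = t.length := Int.toNat_natCast _
    rw [show ((t.length + 1 : Nat) : Int) - 1 = (t.length : Int) - 1 + 1 by push_cast; ring]
    have h3 : (t.length : Int) - 1 + 1 = (t.length : Int) := by ring
    rw [h3]
    by_cases hch : ch = ' '
    · simp only [hch, ne_eq, not_true_eq_false, if_false]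
      rw [ih]
      simp [pvVal, pvDigit]
    · simp only [ne_eq, hch, not_false_eq_true, if_true]
      rw [ih, h2]
      simp [pvVal, pvDigit, hch]
      ring

lemma pvB_fold (l : List Char) (c : Int) :
    l.foldl (fun (code : Int) ch => code * 27 + (if ch = ' ' then 0 else (ch.toNat : Int) - 96)) c
      = c * 27 ^ l.length + pvVal l := by
  induction l generalizing c with
  | nil => simp [pvVal]
  | cons ch t ih =>
    simp only [List.foldl_cons, List.length_cons]
    rw [ih]
    simp only [pvVal, pvDigit]
    ring

-- ===== VERDICT (by name: the statement is the Claim_ definition above) =====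
theorem message_to_int_py_spec : Claim_equal_message_to_int_py := by
  intro msg _
  unfold Spec_message_to_int_py message_to_int_py message_to_int_py_alt
  rw [pvA_fold, pvB_fold]
  ring
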